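-- pv_equiv track=rewrite | github.com/pppihf/llm_learning | 07_inference_optimization.py | simulate_continuous_batching
-- ===== SOURCE A (Python) =====
-- def simulate_continuous_batching(requests, max_batch):
--     total_steps = 0
--     remaining = list(requests)
--     active = []
--
--     while remaining or active:
--         # 填满 batch
--         while len(active) < max_batch and remaining:
--             active.append(remaining.pop(0))
--
--         if not active:
--             break
--
--         # 每步所有 active 的请求各生成一个 token
--         total_steps += 1
--         active = [r - 1 for r in active]
--         active = [r for r in active if r > 0]  # 移除完成的
--
--     return total_steps
-- ===== SOURCE B (Python) =====
-- def simulate_continuous_batching(requests, max_batch):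
--     # Event-driven: jump by the minimum remaining length in the batch instead of
--     # stepping one token at a time; non-positive requests cost one step like A.
--     if max_batch <= 0:
--         return 0
--     pending = [max(r, 1) for r in requests]
--     steps = 0
--     active = []
--     while pending or active:
--         free = max_batch - len(active)
--         active = active + pending[:free]
--         pending = pending[free:]
--         d = min(active)
--         steps += d
--         active = [r - d for r in active if r > d]
--     return steps
-- ===== Notes on version B (the rewrite author's own statement) =====
-- stated objective: faster
-- what changed: Replaces the one-token-per-iteration simulation with an event-driven jump: advance time by the minimum remaining length of the current batch, drop the finished requests and refill, after normalizing request lengths to max(r,1).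
import Mathlib
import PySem

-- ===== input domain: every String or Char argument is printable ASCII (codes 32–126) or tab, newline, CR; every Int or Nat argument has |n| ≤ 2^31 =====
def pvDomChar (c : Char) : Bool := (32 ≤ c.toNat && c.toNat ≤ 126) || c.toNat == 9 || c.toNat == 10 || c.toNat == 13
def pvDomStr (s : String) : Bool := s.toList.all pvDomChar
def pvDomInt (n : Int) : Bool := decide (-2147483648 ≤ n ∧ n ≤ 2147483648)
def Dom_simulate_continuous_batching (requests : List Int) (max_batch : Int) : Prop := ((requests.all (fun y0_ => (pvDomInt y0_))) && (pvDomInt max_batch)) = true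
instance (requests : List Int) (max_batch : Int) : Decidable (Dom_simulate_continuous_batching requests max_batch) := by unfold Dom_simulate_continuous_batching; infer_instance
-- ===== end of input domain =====

-- B replaces A's one-token-per-step simulation by an event-driven jump (advance by the
-- minimum remaining length of the batch, drop finished requests, refill); faster on long requests.

-- ===== PORT A =====
-- the inner 'while len(active) < max_batch and remaining' fill loop of A
def pvFillA (active remaining : List Int) (max_batch : Int) : List Int × List Int :=
  match remaining with
  | [] => (active, [])
  | r :: rest =>
    if (active.length : Int) < max_batch then pvFillA (active ++ [r]) rest max_batch
    else (active, r :: rest)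

-- fuel bound for A's while loop: each request holds max(r,1) pending tokens and every
-- iteration that does not return consumes at least one of them
def pvMeasure (l : List Int) : Nat := (l.map (fun r => (max r 1).toNat)).sum

-- A's outer while loop; the fuel argument is a totality guard only (simulate_continuous_batching
-- supplies pvMeasure requests + 1, which is proved sufficient by the theorems below)
def pvLoopA (fuel : Nat) (total : Int) (remaining active : List Int) (max_batch : Int) : Int :=
  match fuel with
  | 0 => total
  | fuel + 1 =>
    if remaining = [] ∧ active = [] then total
    else
      let p := pvFillA active remaining max_batch
      if p.1 = [] then total
      else pvLoopA fuel (total + 1) p.2 ((p.1.map (fun r => r - 1)).filter (fun r => decide (0 < r))) max_batch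

def simulate_continuous_batching (requests : List Int) (max_batch : Int) : Int :=
  pvLoopA (pvMeasure requests + 1) 0 requests [] max_batch

-- ===== PORT B =====
-- Source B's while loop: refill from pending, then jump by d = min(active); the fuel argument is a
-- totality guard only (every iteration finishes at least one request, so requests.length + 1 is enough)
def pvLoopB (fuel : Nat) (steps : Int) (pending active : List Int) (max_batch : Int) : Int :=
  match fuel with
  | 0 => steps
  | fuel + 1 =>
    if pending = [] ∧ active = [] then steps
    else
      let act := active ++ PySem.List.slice pending none (some (max_batch - (active.length : Int)))
      let pend := PySem.List.slice pending (some (max_batch - (active.length : Int))) none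
      match PySem.List.min? act (fun x => x) with
      | none => steps   -- unreachable when max_batch ≥ 1 (Source B guards max_batch ≤ 0)
      | some d => pvLoopB fuel (steps + d) pend ((act.filter (fun r => decide (d < r))).map (fun r => r - d)) max_batch

def simulate_continuous_batching_alt (requests : List Int) (max_batch : Int) : Int :=
  if max_batch ≤ 0 then 0
  else pvLoopB (requests.length + 1) 0 (requests.map (fun r => max r 1)) [] max_batch

-- ===== PRECONDITION & SPEC =====
def Spec_simulate_continuous_batching (requests : List Int) (max_batch : Int) (out : Int) : Prop := out = simulate_continuous_batching_alt requests max_batch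
instance (requests : List Int) (max_batch : Int) (out : Int) : Decidable (Spec_simulate_continuous_batching requests max_batch out) := by unfold Spec_simulate_continuous_batching; infer_instance

-- ===== CLAIM (what is proved, stated in full; the proofs are below) =====
def Claim_equal_simulate_continuous_batching : Prop := ∀ (requests : List Int) (max_batch : Int), Dom_simulate_continuous_batching requests max_batch → Spec_simulate_continuous_batching requests max_batch (simulate_continuous_batching requests max_batch)

-- ===== LEMMAS AND PROOFS =====

theorem pvLoopA_unfold (fuel : Nat) (t : Int) (rem act : List Int) (mb : Int) :
    pvLoopA (fuel + 1) t rem act mb =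
      if rem = [] ∧ act = [] then t
      else
        if (pvFillA act rem mb).1 = [] then t
        else pvLoopA fuel (t + 1) (pvFillA act rem mb).2
          (((pvFillA act rem mb).1.map (fun r => r - 1)).filter (fun r => decide (0 < r))) mb := rfl

theorem pvFillA_char (remaining : List Int) (active : List Int) (max_batch : Int) :
    pvFillA active remaining max_batch =
      (active ++ remaining.take (max_batch - (active.length : Int)).toNat,
       remaining.drop (max_batch - (active.length : Int)).toNat) := by
  induction remaining generalizing active with
  | nil => simp [pvFillA]
  | cons r rest ih =>
    rw [pvFillA]
    by_cases h : (active.length : Int) < max_batch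
    · rw [if_pos h, ih]
      have hk : (max_batch - (active.length : Int)).toNat
          = (max_batch - ((active ++ [r]).length : Int)).toNat + 1 := by
        simp only [List.length_append, List.length_cons, List.length_nil]
        omega
      rw [hk]
      simp [List.take_succ_cons, List.drop_succ_cons, List.append_assoc]
    · rw [if_neg h]
      have hk : (max_batch - (active.length : Int)).toNat = 0 := by omega
      simp [hk]

theorem pvMeasure_append (a b : List Int) : pvMeasure (a ++ b) = pvMeasure a + pvMeasure b := by
  simp [pvMeasure]

theorem pvMeasure_cons (x : Int) (xs : List Int) :
    pvMeasure (x :: xs) = (max x 1).toNat + pvMeasure xs := by simp [pvMeasure]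

theorem pvFillA_measure (active remaining : List Int) (max_batch : Int) :
    pvMeasure (pvFillA active remaining max_batch).1 + pvMeasure (pvFillA active remaining max_batch).2
      = pvMeasure remaining + pvMeasure active := by
  rw [pvFillA_char]
  simp only [pvMeasure_append]
  have : pvMeasure (remaining.take (max_batch - (active.length : Int)).toNat)
      + pvMeasure (remaining.drop (max_batch - (active.length : Int)).toNat) = pvMeasure remaining := by
    rw [← pvMeasure_append, List.take_append_drop]
  omega

theorem pvMeasure_eq_zero (l : List Int) (h : pvMeasure l = 0) : l = [] := by
  cases l with
  | nil => rfl
  | cons x xs => rw [pvMeasure_cons] at h; omega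

theorem pvMeasure_map_norm (l : List Int) :
    pvMeasure (l.map (fun r => max r 1)) = pvMeasure l := by
  induction l with
  | nil => rfl
  | cons x xs ih =>
    simp only [List.map_cons, pvMeasure_cons, ih]
    omega

theorem pvMeasure_mem (d : Int) (l : List Int) (h : d ∈ l) : (max d 1).toNat ≤ pvMeasure l := by
  induction l with
  | nil => simp at h
  | cons x xs ih =>
    rw [pvMeasure_cons]
    rcases List.mem_cons.mp h with h | h
    · subst h; omega
    · have := ih h; omega

theorem pvMapNormId (l : List Int) (h : ∀ x ∈ l, 1 ≤ x) :
    l.map (fun r => max r 1) = l := by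
  induction l with
  | nil => rfl
  | cons x xs ih =>
    have hx : max x 1 = x := by have := h x (by simp); omega
    simp only [List.map_cons, hx, ih (fun y hy => h y (List.mem_cons_of_mem _ hy))]

theorem pvStepShift (k : Int) (l : List Int) :
    ((l.map (fun r => r - 1)).filter (fun r => decide (k < r))).map (fun r => r - k)
      = (l.filter (fun r => decide (k + 1 < r))).map (fun r => r - (k + 1)) := by
  induction l with
  | nil => rfl
  | cons x xs ih =>
    by_cases h1 : k < x - 1
    · have h2 : k + 1 < x := by omega
      simp only [List.map_cons, List.filter_cons, h1, h2, decide_true, if_true, List.map_cons, ih]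
      congr 1
      omega
    · have h2 : ¬ (k + 1 < x) := by omega
      simp only [List.map_cons, List.filter_cons, h1, h2, decide_false, Bool.false_eq_true,
        if_false, ih]

theorem pvStepAEq (l : List Int) :
    (l.map (fun r => r - 1)).filter (fun r => decide (0 < r))
      = (l.filter (fun r => decide (1 < r))).map (fun r => r - 1) := by
  induction l with
  | nil => rfl
  | cons x xs ih =>
    by_cases h1 : (0 : Int) < x - 1
    · have h2 : (1 : Int) < x := by omega
      simp only [List.map_cons, List.filter_cons, h1, h2, decide_true, if_true, ih]
    · have h2 : ¬ ((1 : Int) < x) := by omega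
      simp only [List.map_cons, List.filter_cons, h1, h2, decide_false, Bool.false_eq_true,
        if_false, ih]

theorem pvNormStep (l : List Int) :
    ((l.map (fun r => max r 1)).map (fun r => r - 1)).filter (fun r => decide (0 < r))
      = (l.map (fun r => r - 1)).filter (fun r => decide (0 < r)) := by
  induction l with
  | nil => rfl
  | cons x xs ih =>
    by_cases h1 : (0 : Int) < x - 1
    · have h3 : max x 1 - 1 = x - 1 := by omega
      simp only [List.map_cons, List.filter_cons, h3, h1, decide_true, if_true, ih]
    · have h2 : ¬ ((0 : Int) < max x 1 - 1) := by omega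
      simp only [List.map_cons, List.filter_cons, h1, h2, decide_false, Bool.false_eq_true,
        if_false, ih]

theorem pvStepAllBig (l : List Int) (h : ∀ x ∈ l, 2 ≤ x) :
    (l.map (fun r => r - 1)).filter (fun r => decide (0 < r)) = l.map (fun r => r - 1) := by
  apply List.filter_eq_self.mpr
  intro a ha
  obtain ⟨x, hx, rfl⟩ := List.mem_map.mp ha
  have := h x hx
  simp
  omega

theorem pvJumpLe (d : Int) (l : List Int) (hd : 0 ≤ d) :
    pvMeasure ((l.filter (fun r => decide (d < r))).map (fun r => r - d)) ≤ pvMeasure l := by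
  induction l with
  | nil => simp [pvMeasure]
  | cons x xs ih =>
    by_cases h1 : d < x
    · simp only [List.filter_cons, h1, decide_true, if_true, List.map_cons, pvMeasure_cons]
      omega
    · simp only [List.filter_cons, h1, decide_false, Bool.false_eq_true, if_false, pvMeasure_cons]
      omega

-- the event jump frees at least d tokens of the measure (the minimum element d is finished)
theorem pvJumpLePlus (d : Int) (l : List Int) (hd : 1 ≤ d) (hmem : d ∈ l) :
    pvMeasure ((l.filter (fun r => decide (d < r))).map (fun r => r - d)) + d.toNat ≤ pvMeasure l := by
  induction l with
  | nil => simp at hmem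
  | cons x xs ih =>
    rcases List.mem_cons.mp hmem with h | h
    · have hx : (decide (d < x)) = false := by rw [← h]; simp
      have hle := pvJumpLe d xs (by omega)
      simp only [List.filter_cons, hx, Bool.false_eq_true, if_false, pvMeasure_cons]
      rw [← h]
      omega
    · have := ih h
      by_cases h1 : d < x
      · simp only [List.filter_cons, h1, decide_true, if_true, List.map_cons, pvMeasure_cons]
        omega
      · simp only [List.filter_cons, h1, decide_false, Bool.false_eq_true, if_false, pvMeasure_cons]
        omega

-- the fill loop is a no-op on an already-filled state
theorem pvFillA_noop (act rem : List Int) (mb : Int)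
    (h : (mb - (act.length : Int)).toNat = 0 ∨ rem = []) :
    pvFillA act rem mb = (act, rem) := by
  rcases h with h | h
  · rw [pvFillA_char, h]; simp
  · subst h; simp [pvFillA]

-- the filled-state invariant is reproduced after a fill from any state
theorem pvFillA_full (act rem : List Int) (mb : Int) (hlen : (act.length : Int) ≤ mb) :
    (mb - ((pvFillA act rem mb).1.length : Int)).toNat = 0 ∨ (pvFillA act rem mb).2 = [] := by
  rw [pvFillA_char]
  by_cases h : (mb - (act.length : Int)).toNat ≤ rem.length
  · left
    simp [List.length_take]
    omega
  · right
    simp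
    omega

-- A's loop advances by k steps at once from a filled state whose batch minimum is at least k
theorem pvJump (k : Nat) : ∀ (g : Nat) (t : Int) (rem act : List Int) (mb : Int),
    1 ≤ k → act ≠ [] → (∀ x ∈ act, (k : Int) ≤ x) →
    ((mb - (act.length : Int)).toNat = 0 ∨ rem = []) →
    pvLoopA (g + k) t rem act mb
      = pvLoopA g (t + k) rem ((act.filter (fun r => decide ((k : Int) < r))).map (fun r => r - k)) mb := by
  induction k with
  | zero => intro g t rem act mb hk; omega
  | succ k ih =>
    intro g t rem act mb hk hne hge hfull
    show pvLoopA ((g + k) + 1) t rem act mb = _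
    have hnoop := pvFillA_noop act rem mb hfull
    have hemp : ¬ (rem = [] ∧ act = []) := fun h => hne h.2
    rw [pvLoopA_unfold, if_neg hemp, hnoop]
    dsimp only
    rw [if_neg hne]
    by_cases hk0 : k = 0
    · subst hk0
      rw [pvStepAEq]
      norm_num
    · have hbig : ∀ x ∈ act, 2 ≤ x := by
        intro x hx
        have := hge x hx
        have hk1 : (1 : Int) ≤ (k : Int) := by exact_mod_cast Nat.one_le_iff_ne_zero.mpr hk0
        push_cast at this
        omega
      rw [pvStepAllBig act hbig]
      have hne' : act.map (fun r => r - 1) ≠ [] := by simpa using hne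
      have hge' : ∀ x ∈ act.map (fun r => r - 1), (k : Int) ≤ x := by
        intro x hx
        obtain ⟨y, hy, rfl⟩ := List.mem_map.mp hx
        have := hge y hy
        push_cast at this
        omega
      have hfull' : ((mb - ((act.map (fun r => r - 1)).length : Int)).toNat = 0 ∨ rem = []) := by
        simpa using hfull
      rw [ih g (t + 1) rem _ mb (by omega) hne' hge' hfull']
      rw [pvStepShift]
      have h1 : (t + 1) + (k : Int) = t + ((k + 1 : Nat) : Int) := by push_cast; ring
      have h2 : ((k : Int) + 1) = ((k + 1 : Nat) : Int) := by push_cast; ring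
      rw [h1, h2]

-- main bridge: on states with normalized (≥ 1) entries, a feasible batch and enough fuel,
-- A's loop equals B's loop
theorem pvMain (n : Nat) : ∀ (fA fB : Nat) (t : Int) (rem act : List Int) (mb : Int),
    pvMeasure rem + pvMeasure act ≤ n →
    pvMeasure rem + pvMeasure act < fA → rem.length + act.length < fB → 1 ≤ mb →
    (∀ x ∈ rem, 1 ≤ x) → (∀ x ∈ act, 1 ≤ x) → (act.length : Int) ≤ mb →
    pvLoopA fA t rem act mb = pvLoopB fB t rem act mb := by
  induction n with
  | zero =>
    intro fA fB t rem act mb hn hfA hfB hmb hrem hact hlen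
    obtain ⟨fA, rfl⟩ : ∃ m, fA = m + 1 := ⟨fA - 1, by omega⟩
    obtain ⟨fB, rfl⟩ : ∃ m, fB = m + 1 := ⟨fB - 1, by omega⟩
    rw [pvMeasure_eq_zero rem (by omega), pvMeasure_eq_zero act (by omega)]
    rfl
  | succ n ih =>
    intro fA fB t rem act mb hn hfA hfB hmb hrem hact hlen
    obtain ⟨fA, rfl⟩ : ∃ m, fA = m + 1 := ⟨fA - 1, by omega⟩
    obtain ⟨fB, rfl⟩ : ∃ m, fB = m + 1 := ⟨fB - 1, by omega⟩
    by_cases hemp : rem = [] ∧ act = []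
    · obtain ⟨h1, h2⟩ := hemp
      subst h1; subst h2
      rfl
    · have hf0 : (0 : Int) ≤ mb - (act.length : Int) := by omega
      set f := (mb - (act.length : Int)).toNat with hf
      have hchar := pvFillA_char rem act mb
      rw [← hf] at hchar
      have hne1 : act ++ rem.take f ≠ [] := by
        intro hcon
        rcases List.append_eq_nil_iff.mp hcon with ⟨hanil, htake⟩
        have hrnil : rem ≠ [] := fun h => hemp ⟨h, hanil⟩
        have hr1 : 0 < rem.length := List.length_pos_of_ne_nil hrnil
        have hl0 : act.length = 0 := by simp [hanil]
        have hf1 : 1 ≤ f := by omega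
        have hlt : min f rem.length = 0 := by
          simpa [List.length_take] using congrArg List.length htake
        omega
      have ha1 : ∀ x ∈ act ++ rem.take f, 1 ≤ x := by
        intro x hx
        rcases List.mem_append.mp hx with h | h
        · exact hact x h
        · exact hrem x (List.mem_of_mem_take h)
      have hfull2 := pvFillA_full act rem mb hlen
      rw [hchar] at hfull2
      dsimp only at hfull2
      rcases hmin : PySem.List.min? (act ++ rem.take f) (fun x => x) with _ | d
      · exact absurd ((PySem.List.min?_eq_none_iff _ _).mp hmin) hne1
      have hdmem := PySem.List.min?_mem hmin
      have hdmin := PySem.List.min?_isMin hmin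
      have hd1 : 1 ≤ d := ha1 d hdmem
      have hcast : ((d.toNat : Int)) = d := Int.toNat_of_nonneg (by omega)
      have hcons := pvFillA_measure act rem mb
      rw [hchar] at hcons
      dsimp only at hcons
      have hkμ : d.toNat ≤ pvMeasure (act ++ rem.take f) := by
        have := pvMeasure_mem d (act ++ rem.take f) hdmem
        omega
      -- A's loop from (rem, act) and from the filled state (drop, act ++ take) coincide
      have stepA1 : pvLoopA (fA + 1) t rem act mb
          = pvLoopA (fA + 1) t (rem.drop f) (act ++ rem.take f) mb := by
        rw [pvLoopA_unfold, if_neg hemp, hchar]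
        dsimp only
        rw [if_neg hne1]
        rw [pvLoopA_unfold fA t (rem.drop f) (act ++ rem.take f) mb]
        have hemp2 : ¬ (rem.drop f = [] ∧ act ++ rem.take f = []) := fun h => hne1 h.2
        rw [if_neg hemp2, pvFillA_noop _ _ _ hfull2]
        dsimp only
        rw [if_neg hne1]
      -- the event jump on A's side
      have hsplit : (fA + 1 - d.toNat) + d.toNat = fA + 1 := by omega
      have stepA2 := pvJump d.toNat (fA + 1 - d.toNat) t (rem.drop f) (act ++ rem.take f) mb
        (by omega) hne1
        (by intro x hx; rw [hcast]; exact hdmin x hx)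
        hfull2
      rw [hsplit, hcast] at stepA2
      -- B's loop unfolds to the same jumped state
      have hsl1 : PySem.List.slice rem none (some (mb - (act.length : Int))) = rem.take f :=
        PySem.List.slice_to rem hf0
      have hsl2 : PySem.List.slice rem (some (mb - (act.length : Int))) none = rem.drop f :=
        PySem.List.slice_from rem hf0
      have stepB : pvLoopB (fB + 1) t rem act mb
          = pvLoopB fB (t + d) (rem.drop f)
              (((act ++ rem.take f).filter (fun r => decide (d < r))).map (fun r => r - d)) mb := by
        rw [pvLoopB, if_neg hemp]
        dsimp only
        split
        next heq =>
          rw [hsl1, hmin] at heq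
          cases heq
        next d' heq =>
          rw [hsl1, hmin] at heq
          injection heq with h
          subst h
          simp only [hsl1, hsl2]
      -- invariants for the recursive state
      have hplus := pvJumpLePlus d (act ++ rem.take f) hd1 hdmem
      have hlen1 : (act ++ rem.take f).length ≤ act.length + f := by
        rw [List.length_append, List.length_take]
        omega
      have hfil : (((act ++ rem.take f).filter (fun r => decide (d < r))).map (fun r => r - d)).length
          < (act ++ rem.take f).length := by
        rw [List.length_map]
        exact (List.length_filter_lt_length_iff_exists (p := fun r => decide (d < r))).mpr
          ⟨d, hdmem, by simp⟩
      have hdrople : (rem.take f).length + (rem.drop f).length = rem.length := by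
        rw [List.length_take, List.length_drop]
        omega
      have ihres := ih (fA + 1 - d.toNat) fB (t + d) (rem.drop f)
        (((act ++ rem.take f).filter (fun r => decide (d < r))).map (fun r => r - d)) mb
        (by omega) (by omega)
        (by rw [List.length_append] at hfil; omega)
        hmb
        (by intro x hx; exact hrem x (List.mem_of_mem_drop hx))
        (by
          intro x hx
          obtain ⟨y, hy, rfl⟩ := List.mem_map.mp hx
          have := List.of_mem_filter hy
          simp at this
          omega)
        (by
          have h1 : (((act ++ rem.take f).filter (fun r => decide (d < r))).map (fun r => r - d)).length
              ≤ (act ++ rem.take f).length := by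
            rw [List.length_map]
            exact List.length_filter_le _ _
          have h2 : ((f : Int)) = mb - (act.length : Int) := by omega
          omega)
      rw [stepA1, stepA2, ihres, ← stepB]

-- A's loop is invariant under normalizing every entry to max(r, 1)
theorem pvLoopA_norm (fuel : Nat) : ∀ (t : Int) (rem act : List Int) (mb : Int),
    pvLoopA fuel t rem act mb
      = pvLoopA fuel t (rem.map (fun r => max r 1)) (act.map (fun r => max r 1)) mb := by
  induction fuel with
  | zero => intro t rem act mb; rfl
  | succ fuel ih =>
    intro t rem act mb
    by_cases hemp : rem = [] ∧ act = []
    · obtain ⟨h1, h2⟩ := hemp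
      subst h1; subst h2
      rfl
    · have hemp2 : ¬ (rem.map (fun r => max r 1) = [] ∧ act.map (fun r => max r 1) = []) := by
        simpa using hemp
      rw [pvLoopA_unfold fuel t rem act mb, if_neg hemp]
      rw [pvLoopA_unfold fuel t (rem.map (fun r => max r 1)) (act.map (fun r => max r 1)) mb,
        if_neg hemp2]
      have hcharm : pvFillA (act.map (fun r => max r 1)) (rem.map (fun r => max r 1)) mb
          = ((pvFillA act rem mb).1.map (fun r => max r 1),
             (pvFillA act rem mb).2.map (fun r => max r 1)) := by
        rw [pvFillA_char, pvFillA_char]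
        simp [List.map_take, List.map_drop]
      rw [hcharm]
      dsimp only
      by_cases hp : (pvFillA act rem mb).1 = []
      · rw [if_pos hp, if_pos (by simp [hp])]
      · rw [if_neg hp, if_neg (by simpa using hp)]
        rw [pvNormStep (pvFillA act rem mb).1]
        rw [ih (t + 1) (pvFillA act rem mb).2
          (((pvFillA act rem mb).1.map (fun r => r - 1)).filter (fun r => decide (0 < r)))]
        rw [pvMapNormId (((pvFillA act rem mb).1.map (fun r => r - 1)).filter (fun r => decide (0 < r))) (by
          intro x hx
          have := List.of_mem_filter hx
          simp at this
          omega)]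

-- ===== VERDICT (by name: the statement is the Claim_ definition above) =====
theorem simulate_continuous_batching_spec : Claim_equal_simulate_continuous_batching := by
  intro requests mb _
  unfold Spec_simulate_continuous_batching simulate_continuous_batching simulate_continuous_batching_alt
  by_cases hmb : mb ≤ 0
  · rw [if_pos hmb, pvLoopA_unfold]
    by_cases hreq : requests = []
    · simp [hreq]
    · rw [if_neg (by simp [hreq])]
      have hnil : (pvFillA [] requests mb).1 = [] := by
        rw [pvFillA_char]
        simp
        exact Or.inl hmb
      rw [if_pos hnil]
  · rw [if_neg hmb]
    have hnorm := pvLoopA_norm (pvMeasure requests + 1) 0 requests [] mb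
    simp only [List.map_nil] at hnorm
    rw [hnorm]
    exact pvMain (pvMeasure (requests.map (fun r => max r 1)) + pvMeasure ([] : List Int))
      (pvMeasure requests + 1) (requests.length + 1)
      0 (requests.map (fun r => max r 1)) [] mb (le_refl _)
      (by rw [pvMeasure_map_norm]; have h0 : pvMeasure ([] : List Int) = 0 := rfl; omega)
      (by simp)
      (by omega)
      (by intro x hx; obtain ⟨y, hy, rfl⟩ := List.mem_map.mp hx; omega)
      (by simp)
      (by simp; omega)
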